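-- pv_equiv track=rewrite | github.com/TenIdiotZInternetu/Competitions | Google foobar/Cells_ID.py | solution
-- ===== SOURCE A (Python) =====
-- def solution(x, y):
--     id = 1
--
--     for i in range(x - 1):
--         add = 2 + i
--         id += add
--
--     base = add
--
--     for i in range(y - 1):
--         add = base + i
--         id += add
--
--     return str(id)
-- ===== SOURCE B (Python) =====
-- def solution(x, y):
--     n = max(y - 1, 0)
--     return str(1 + (x - 1) * (x + 2) // 2 + n * x + n * (n - 1) // 2)
-- ===== Notes on version B (the rewrite author's own statement) =====
-- stated objective: faster
-- what changed: Replaced the two accumulation loops by a closed-form arithmetic-series formula (Gauss sums), O(1) instead of O(x+y).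
import Mathlib
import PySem

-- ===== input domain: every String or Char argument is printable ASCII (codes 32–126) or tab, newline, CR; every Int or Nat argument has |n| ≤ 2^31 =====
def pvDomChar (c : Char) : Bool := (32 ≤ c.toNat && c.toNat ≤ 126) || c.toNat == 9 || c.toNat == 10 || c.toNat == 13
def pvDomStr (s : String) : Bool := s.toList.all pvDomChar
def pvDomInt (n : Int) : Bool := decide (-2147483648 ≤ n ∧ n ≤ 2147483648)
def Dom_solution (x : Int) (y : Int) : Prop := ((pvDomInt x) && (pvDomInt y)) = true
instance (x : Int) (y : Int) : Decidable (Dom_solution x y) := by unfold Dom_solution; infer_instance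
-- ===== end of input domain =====

-- B replaces A's two accumulation loops by a closed-form arithmetic-series formula (objective: faster, O(1) vs O(x+y)).

-- ===== PORT A =====
-- the `add` variable is unassigned before the first loop: modelled as Option Int;
-- the `none` branch (Python NameError) is excluded by Pre_solution, "" is a mere totaliser.
def solution (x : Int) (y : Int) : String :=
  let s1 := (PySem.List.pyRange 0 (x - 1) 1).foldl
      (fun (s : Int × Option Int) i => (s.1 + (2 + i), some (2 + i))) (1, none)
  match s1.2 with
  | none => ""
  | some base =>
      let id2 := (PySem.List.pyRange 0 (y - 1) 1).foldl (fun id i => id + (base + i)) s1.1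
      PySem.Int.toStr id2

-- ===== PORT B =====
def solution_alt (x : Int) (y : Int) : String :=
  let n := max (y - 1) 0
  PySem.Int.toStr (1 + PySem.Int.floordiv ((x - 1) * (x + 2)) 2 + n * x
                     + PySem.Int.floordiv (n * (n - 1)) 2)

-- ===== PRECONDITION & SPEC =====
-- Pre_ excludes x ≤ 1, where A's first loop body never runs and the read of `add` raises NameError.
def Pre_solution (x : Int) (y : Int) : Prop := 2 ≤ x
instance (x : Int) (y : Int) : Decidable (Pre_solution x y) := by unfold Pre_solution; infer_instance
def pvWitness_solution : Int × Int := (5, 7)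

def Spec_solution (x : Int) (y : Int) (out : String) : Prop := out = solution_alt x y
instance (x : Int) (y : Int) (out : String) : Decidable (Spec_solution x y out) := by unfold Spec_solution; infer_instance

-- ===== CLAIM (what is proved, stated in full; the proofs are below) =====
def Claim_equal_solution : Prop := ∀ (x : Int) (y : Int), Dom_solution x y → Pre_solution x y → Spec_solution x y (solution x y)

-- ===== LEMMAS AND PROOFS =====

-- m*(m-1) is even, and the resulting exact halves obey the shift law used in the inductions
theorem pv_half_step (m : Int) : m * (m - 1) / 2 + m = (m + 1) * m / 2 := by
  obtain ⟨k, hk⟩ : Even ((m - 1) * m) := by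
    have := Int.even_mul_succ_self (m - 1)
    simpa using this
  have h1 : m * (m - 1) = 2 * k := by linarith [hk]
  have h2 : (m + 1) * m = 2 * (k + m) := by nlinarith [hk]
  rw [h1, h2, Int.mul_ediv_cancel_left _ (by norm_num), Int.mul_ediv_cancel_left _ (by norm_num)]

-- second loop of A: pure Gauss sum
theorem pv_loop2 (n : Nat) (b s : Int) :
    (PySem.List.pyRange 0 n 1).foldl (fun id i => id + (b + i)) s
      = s + n * b + (n : Int) * ((n : Int) - 1) / 2 := by
  induction n generalizing s with
  | zero => simp
  | succ k ih =>
    have hsplit : PySem.List.pyRange 0 ((k : Int) + 1) 1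
        = PySem.List.pyRange 0 k 1 ++ [(k : Int)] :=
      PySem.List.pyRange_one_succ_right (by positivity)
    push_cast
    rw [hsplit, List.foldl_append, ih]
    simp only [List.foldl_cons, List.foldl_nil]
    have h := pv_half_step (k : Int)
    have hs : (k : Int) + 1 - 1 = (k : Int) := by ring
    rw [hs]
    linarith

-- first loop of A: for n ≥ 1 it ends with id = 1 + 2n + n(n-1)/2 and add = n+1
theorem pv_loop1 (n : Nat) (hn : 1 ≤ n) :
    (PySem.List.pyRange 0 n 1).foldl
        (fun (s : Int × Option Int) i => (s.1 + (2 + i), some (2 + i))) (1, none)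
      = (1 + 2 * n + (n : Int) * ((n : Int) - 1) / 2, some ((n : Int) + 1)) := by
  induction n with
  | zero => omega
  | succ k ih =>
    have hsplit : PySem.List.pyRange 0 ((k : Int) + 1) 1
        = PySem.List.pyRange 0 k 1 ++ [(k : Int)] :=
      PySem.List.pyRange_one_succ_right (by positivity)
    push_cast
    rw [hsplit, List.foldl_append]
    rcases Nat.eq_zero_or_pos k with hk | hk
    · subst hk; norm_num [PySem.List.pyRange_zero_nat]
    · rw [ih hk]
      simp only [List.foldl_cons, List.foldl_nil, Prod.mk.injEq]
      have h := pv_half_step (k : Int)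
      have hs : (k : Int) + 1 - 1 = (k : Int) := by ring
      rw [hs]
      exact ⟨by linarith, by norm_num; ring⟩

-- ===== VERDICT (by name: the statement is the Claim_ definition above) =====
theorem solution_spec : Claim_equal_solution := by
  intro x y _ hpre
  unfold Spec_solution solution solution_alt
  have hx : 2 ≤ x := hpre
  obtain ⟨n, hn1, hxn⟩ : ∃ n : Nat, 1 ≤ n ∧ x - 1 = (n : Int) :=
    ⟨(x - 1).toNat, by omega, by omega⟩
  rw [hxn, pv_loop1 n hn1]
  simp only
  have hx1 : x = (n : Int) + 1 := by omega
  rcases le_or_gt y 1 with hy | hy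
  · have hnil : PySem.List.pyRange 0 (y - 1) 1 = [] :=
      PySem.List.pyRange_one_eq_nil (by omega)
    have hmax : max (y - 1) 0 = (0 : Int) := by omega
    rw [hnil, hmax]
    simp only [List.foldl_nil]
    congr 1
    rw [PySem.Int.floordiv_eq_ediv_of_pos (by norm_num),
        PySem.Int.floordiv_eq_ediv_of_pos (by norm_num)]
    subst hx1
    have h1 : (n : Int) * ((n : Int) + 1 + 2) = (n : Int) * ((n : Int) - 1) + 2 * (2 * n) := by ring
    rw [h1, Int.add_mul_ediv_left _ _ (by norm_num : (2:Int) ≠ 0)]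
    norm_num
    ring
  · obtain ⟨m, hym⟩ : ∃ m : Nat, y - 1 = (m : Int) := ⟨(y - 1).toNat, by omega⟩
    have hmax : max (y - 1) 0 = ((m : Nat) : Int) := by omega
    rw [hmax, hym, pv_loop2 m ((n : Int) + 1) _]
    congr 1
    rw [PySem.Int.floordiv_eq_ediv_of_pos (by norm_num),
        PySem.Int.floordiv_eq_ediv_of_pos (by norm_num)]
    subst hx1
    have h1 : (n : Int) * ((n : Int) + 1 + 2) = (n : Int) * ((n : Int) - 1) + 2 * (2 * n) := by ring
    rw [h1, Int.add_mul_ediv_left _ _ (by norm_num : (2:Int) ≠ 0)]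
    ring
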